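-- pv_equiv track=rewrite | github.com/grey920/python-algorythm | w1/day5_1652_2.py | count_horizontal_spaces
-- ===== SOURCE A (Python) =====
-- def count_horizontal_spaces(room, size):
--     row_space_count = 0
--     for i in range(size):
--         space = 0
--         for j in range(size):
--             if room[i][j] == 'X':
--                 if space >= 2:
--                     row_space_count += 1
--                 space = 0
--             else:
--                 space += 1
--
--         # 마지막 열 처리
--         if space >= 2:
--             row_space_count += 1
--
--     return row_space_count
-- ===== SOURCE B (Python) =====
-- def count_horizontal_spaces(room, size):
--     total = 0
--     for i in range(size):
--         line = ''.join('.' if room[i][j] == 'X' else ' ' for j in range(size))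
--         total += sum(1 for seg in line.split('.') if len(seg) >= 2)
--     return total
-- ===== Notes on version B (the rewrite author's own statement) =====
-- stated objective: simpler
-- what changed: Replaces the running space-counter state machine (with its separate end-of-row check) by mapping each row's cells to run markers, splitting the row into maximal non-'X' runs, and counting the runs of length >= 2.
import Mathlib
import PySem

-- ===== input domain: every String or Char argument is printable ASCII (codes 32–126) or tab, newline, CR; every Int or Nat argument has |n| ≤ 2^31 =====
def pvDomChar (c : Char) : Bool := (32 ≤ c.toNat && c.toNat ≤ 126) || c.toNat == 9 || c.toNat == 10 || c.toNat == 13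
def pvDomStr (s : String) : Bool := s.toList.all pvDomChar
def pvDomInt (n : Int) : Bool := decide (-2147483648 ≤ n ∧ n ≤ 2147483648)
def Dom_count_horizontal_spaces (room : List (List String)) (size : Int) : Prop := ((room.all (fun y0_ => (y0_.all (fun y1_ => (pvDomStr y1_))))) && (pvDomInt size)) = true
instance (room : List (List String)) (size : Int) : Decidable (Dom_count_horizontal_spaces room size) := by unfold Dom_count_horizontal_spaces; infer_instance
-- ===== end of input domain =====

-- B replaces A's space-counter state machine (and its separate end-of-row check) by
-- run-splitting: map each cell of the row to a run marker, split the row into maximal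
-- non-'X' runs, count runs of length ≥ 2.  Return value only; neither mutates its input.

-- ===== PORT A =====
def count_horizontal_spaces (room : List (List String)) (size : Int) : Int :=
  (PySem.List.pyRange 0 size 1).foldl (fun row_space_count i =>
    let p := (PySem.List.pyRange 0 size 1).foldl
      (fun (p : Int × Int) j =>
        if PySem.List.pyGetD (PySem.List.pyGetD room i []) j "" = "X" then
          (0, if 2 ≤ p.1 then p.2 + 1 else p.2)
        else
          (p.1 + 1, p.2)) (0, row_space_count)
    -- 마지막 열 처리 (last-column check)
    if 2 ≤ p.1 then p.2 + 1 else p.2) 0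

-- ===== PORT B =====
-- `line.split('.')` of B, on the list of run markers (true = non-'X' cell, false = '.'):
-- each `true`-run is one segment of the split; segments of length ≥ 2 count 1.
def pvCountSegs : List Bool → Int
  | [] => 0
  | false :: rest => pvCountSegs rest
  | true :: rest =>
      (if 2 ≤ (rest.takeWhile (fun b => b)).length + 1 then 1 else 0)
      + pvCountSegs (rest.dropWhile (fun b => b))
termination_by l => l.length
decreasing_by
  · simp
  · simpa using Nat.lt_succ_of_le (List.length_dropWhile_le _ _)

-- B's `line` is the list of run markers (true = non-'X' cell, false = '.'); `split('.')`
-- of that marker string is pvCountSegs on the marker list.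
def count_horizontal_spaces_alt (room : List (List String)) (size : Int) : Int :=
  (PySem.List.pyRange 0 size 1).foldl (fun total i =>
    total + pvCountSegs ((PySem.List.pyRange 0 size 1).map
      (fun j =>
        if PySem.List.pyGetD (PySem.List.pyGetD room i []) j "" = "X" then false
        else true))) 0

-- ===== PRECONDITION & SPEC =====
-- Pre_ excludes exactly the inputs on which A raises IndexError: a positive size larger
-- than the number of rows, or larger than the length of one of the first `size` rows.
def Pre_count_horizontal_spaces (room : List (List String)) (size : Int) : Prop :=
  size ≤ (room.length : Int) ∧ ∀ row ∈ room.take size.toNat, size ≤ (row.length : Int)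
instance (room : List (List String)) (size : Int) : Decidable (Pre_count_horizontal_spaces room size) := by unfold Pre_count_horizontal_spaces; infer_instance

def pvWitness_count_horizontal_spaces : List (List String) × Int :=
  ([[" ", " "], ["X", "o"]], 2)

def Spec_count_horizontal_spaces (room : List (List String)) (size : Int) (out : Int) : Prop := out = count_horizontal_spaces_alt room size
instance (room : List (List String)) (size : Int) (out : Int) : Decidable (Spec_count_horizontal_spaces room size out) := by unfold Spec_count_horizontal_spaces; infer_instance

-- ===== CLAIM (what is proved, stated in full; the proofs are below) =====
def Claim_equal_count_horizontal_spaces : Prop := ∀ (room : List (List String)) (size : Int), Dom_count_horizontal_spaces room size → Pre_count_horizontal_spaces room size → Spec_count_horizontal_spaces room size (count_horizontal_spaces room size)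

-- ===== LEMMAS AND PROOFS =====

-- A's row state machine, abstracted over the list of cells it actually reads.
def pvStepA (p : Int × Int) (c : String) : Int × Int :=
  if c = "X" then (0, if 2 ≤ p.1 then p.2 + 1 else p.2) else (p.1 + 1, p.2)

-- run count of a cell list, parametrised by the length of the run currently open
def pvG (space : Int) : List String → Int
  | [] => if 2 ≤ space then 1 else 0
  | c :: r => if c = "X" then (if 2 ≤ space then 1 else 0) + pvG 0 r else pvG (space + 1) r

theorem pv_range_map {α : Type} (xs : List α) (d : α) (n : Nat) (h : n ≤ xs.length) :
    (List.range n).map (fun k : Nat => PySem.List.pyGetD xs (k : Int) d) = xs.take n := by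
  apply List.ext_getElem
  · simp; omega
  · intro i h1 h2
    have hi : i < xs.length := by simp at h1; omega
    rw [List.getElem_map, List.getElem_range, List.getElem_take]
    simp [PySem.List.pyGetD_natCast, hi]

-- fold over pyRange 0 m 1 reading xs[j] is a fold over xs.take m.toNat
theorem pv_fold_take {α β : Type} (xs : List α) (d : α) (m : Int)
    (h : m ≤ (xs.length : Int)) (f : β → α → β) (init : β) :
    (PySem.List.pyRange 0 m 1).foldl (fun acc j => f acc (PySem.List.pyGetD xs j d)) init
      = (xs.take m.toNat).foldl f init := by
  have hm : (m - 0).toNat = m.toNat := by omega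
  have hn : m.toNat ≤ xs.length := by omega
  rw [PySem.List.pyRange_one, hm, List.foldl_map]
  simp only [zero_add]
  rw [← pv_range_map xs d m.toNat hn, List.foldl_map]

theorem pv_rowA (cells : List String) : ∀ (space rc : Int), 0 ≤ space →
    (if 2 ≤ (cells.foldl pvStepA (space, rc)).1
      then (cells.foldl pvStepA (space, rc)).2 + 1 else (cells.foldl pvStepA (space, rc)).2)
      = rc + pvG space cells := by
  induction cells with
  | nil =>
    intro space rc _
    by_cases h : 2 ≤ space <;> simp [pvG, h]
  | cons c r ih =>
    intro space rc hs
    simp only [List.foldl_cons, pvG]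
    by_cases hc : c = "X"
    · simp only [pvStepA, if_pos hc]
      by_cases h2 : 2 ≤ space <;> simp only [h2, reduceIte, zero_add]
      · rw [ih 0 (rc + 1) le_rfl]; ring
      · exact ih 0 rc le_rfl
    · simp only [pvStepA, if_neg hc]
      exact ih (space + 1) rc (by omega)

theorem pv_g_pos (cells : List String) : ∀ (k : Int), 1 ≤ k →
    pvG k cells
      = (if 2 ≤ k + ((cells.takeWhile (fun c => !(c == "X"))).length : Int) then 1 else 0)
        + pvG 0 (cells.dropWhile (fun c => !(c == "X"))) := by
  induction cells with
  | nil => intro k hk; simp [pvG]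
  | cons c r ih =>
    intro k hk
    by_cases hc : c = "X"
    · have hb : (c == "X") = true := by simp [hc]
      simp only [pvG, if_pos hc, List.takeWhile_cons, List.dropWhile_cons, hb, Bool.not_true,
        Bool.false_eq_true, reduceIte, List.length_nil, Nat.cast_zero, add_zero, pvG]
      have h0 : ¬ (2 : Int) ≤ 0 := by omega
      simp only [h0, reduceIte, zero_add]
    · have hb : (c == "X") = false := by simp [hc]
      simp only [pvG, if_neg hc, List.takeWhile_cons, List.dropWhile_cons, hb, Bool.not_false,
        if_pos, List.length_cons]
      rw [ih (k + 1) (by omega)]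
      congr 1
      push_cast
      by_cases h2 : 2 ≤ k + 1 + ((r.takeWhile (fun c => !(c == "X"))).length : Int)
      · rw [if_pos h2, if_pos (by omega)]
      · rw [if_neg h2, if_neg (by omega)]

theorem pv_g_eq_segs : ∀ (n : Nat) (cells : List String), cells.length ≤ n →
    pvG 0 cells = pvCountSegs (cells.map (fun c => !(c == "X"))) := by
  intro n
  induction n with
  | zero =>
    intro cells h
    have : cells = [] := by
      cases cells with
      | nil => rfl
      | cons a l => simp at h
    simp [this, pvG, pvCountSegs]
  | succ n ih =>
    intro cells h
    match cells with
    | [] => simp [pvG, pvCountSegs]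
    | c :: r =>
      have hr : r.length ≤ n := by simpa using h
      by_cases hc : c = "X"
      · have hb : (c == "X") = true := by simp [hc]
        simp only [pvG, if_pos hc, List.map_cons, hb, Bool.not_true]
        rw [pvCountSegs]
        have h0 : ¬ (2 : Int) ≤ 0 := by omega
        simp only [h0, reduceIte, zero_add]
        exact ih r hr
      · have hb : (c == "X") = false := by simp [hc]
        simp only [pvG, if_neg hc, List.map_cons, hb, Bool.not_false]
        rw [pvCountSegs, List.takeWhile_map, List.dropWhile_map]
        have hfun : ((fun b : Bool => b) ∘ (fun c : String => !(c == "X")))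
            = (fun c : String => !(c == "X")) := by funext x; simp
        rw [hfun]
        have h1 := pv_g_pos r 1 le_rfl
        rw [show (0 : Int) + 1 = 1 from rfl, h1,
          ih (r.dropWhile (fun c => !(c == "X"))) (le_trans (List.length_dropWhile_le _ _) hr)]
        congr 1
        simp only [List.length_map]
        by_cases h2 : 2 ≤ (1 : Int) + ((r.takeWhile (fun c => !(c == "X"))).length : Int)
        · rw [if_pos h2, if_pos (by omega)]
        · rw [if_neg h2, if_neg (by omega)]

-- A's per-row loop body, as a function of the row it reads (used only in the proofs)
def pvRowStepA (size : Int) (row_space_count : Int) (row : List String) : Int :=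
  let p := (PySem.List.pyRange 0 size 1).foldl
    (fun (p : Int × Int) j =>
      if PySem.List.pyGetD row j "" = "X" then (0, if 2 ≤ p.1 then p.2 + 1 else p.2)
      else (p.1 + 1, p.2)) (0, row_space_count)
  if 2 ≤ p.1 then p.2 + 1 else p.2

-- B's per-row loop body, as a function of the row it reads (used only in the proofs)
def pvRowStepB (size : Int) (total : Int) (row : List String) : Int :=
  total + pvCountSegs ((PySem.List.pyRange 0 size 1).map
    (fun j => if PySem.List.pyGetD row j "" = "X" then false else true))

theorem pv_map_take {α γ : Type} (xs : List α) (d : α) (m : Int)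
    (h : m ≤ (xs.length : Int)) (f : α → γ) :
    (PySem.List.pyRange 0 m 1).map (fun j => f (PySem.List.pyGetD xs j d))
      = (xs.take m.toNat).map f := by
  have hm : (m - 0).toNat = m.toNat := by omega
  have hn : m.toNat ≤ xs.length := by omega
  rw [PySem.List.pyRange_one, hm, List.map_map, ← pv_range_map xs d m.toNat hn,
    List.map_map]
  simp [Function.comp_def]

-- ===== VERDICT (by name: the statement is the Claim_ definition above) =====
theorem count_horizontal_spaces_spec : Claim_equal_count_horizontal_spaces := by
  intro room size _ hpre
  obtain ⟨hlen, hrows⟩ := hpre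
  show count_horizontal_spaces room size = count_horizontal_spaces_alt room size
  have houter : count_horizontal_spaces room size
      = (room.take size.toNat).foldl (pvRowStepA size) 0 :=
    pv_fold_take room [] size hlen (pvRowStepA size) 0
  have halter : count_horizontal_spaces_alt room size
      = (room.take size.toNat).foldl (pvRowStepB size) 0 :=
    pv_fold_take room [] size hlen (pvRowStepB size) 0
  rw [houter, halter]
  apply PySem.List.foldl_congr_mem
  intro acc row hmem
  have hrow : size ≤ (row.length : Int) := hrows row hmem
  have hinner : (PySem.List.pyRange 0 size 1).foldl
      (fun (p : Int × Int) j => pvStepA p (PySem.List.pyGetD row j "")) (0, acc)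
      = (row.take size.toNat).foldl pvStepA (0, acc) :=
    pv_fold_take row "" size hrow pvStepA (0, acc)
  have hmap : (PySem.List.pyRange 0 size 1).map
      (fun j => if PySem.List.pyGetD row j "" = "X" then false else true)
      = (row.take size.toNat).map (fun c => if c = "X" then false else true) :=
    pv_map_take row "" size hrow (fun c => if c = "X" then false else true)
  have hfun : (fun c : String => if c = "X" then false else true)
      = (fun c : String => !(c == "X")) := by
    funext c; by_cases h : c = "X" <;> simp [h]
  show (if 2 ≤ ((PySem.List.pyRange 0 size 1).foldl
          (fun (p : Int × Int) j => pvStepA p (PySem.List.pyGetD row j "")) (0, acc)).1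
        then ((PySem.List.pyRange 0 size 1).foldl
          (fun (p : Int × Int) j => pvStepA p (PySem.List.pyGetD row j "")) (0, acc)).2 + 1
        else ((PySem.List.pyRange 0 size 1).foldl
          (fun (p : Int × Int) j => pvStepA p (PySem.List.pyGetD row j "")) (0, acc)).2)
      = acc + pvCountSegs ((PySem.List.pyRange 0 size 1).map
          (fun j => if PySem.List.pyGetD row j "" = "X" then false else true))
  rw [hinner, hmap, hfun, pv_rowA (row.take size.toNat) 0 acc le_rfl,
    pv_g_eq_segs (row.take size.toNat).length _ le_rfl]
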